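-- pv_equiv track=rewrite | github.com/Riyuechang/data_processing | novel_similarity.py | pre_segmentation
-- ===== SOURCE A (Python) =====
-- def pre_segmentation(
--     text: str,
--     seg_symbol: list[str] = ["\n"]
-- ):
--     text_seg: list[str] = []
--     new_text = text[0]
--
--     for word in text[1:]:
--         if word not in seg_symbol and new_text[-1] in seg_symbol:
--             text_seg.append(new_text)
--             new_text = ""
--
--         new_text += word
--
--     if new_text:
--         text_seg.append(new_text)
--
--     return text_seg
-- ===== SOURCE B (Python) =====
-- def pre_segmentation(
--     text: str,
--     seg_symbol: list[str] = ["\n"]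
-- ):
--     bounds = [0] + [i for i in range(1, len(text))
--                     if text[i] not in seg_symbol and text[i - 1] in seg_symbol] + [len(text)]
--     return [text[a:b] for a, b in zip(bounds, bounds[1:])]
-- ===== Notes on version B (the rewrite author's own statement) =====
-- stated objective: alternative
-- what changed: B replaces A's mutable string-accumulator loop (building each segment char by char and flushing it at boundaries) with a boundary-index comprehension plus pairwise slicing: collect the cut positions once, then slice the text between consecutive bounds.
import Mathlib
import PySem

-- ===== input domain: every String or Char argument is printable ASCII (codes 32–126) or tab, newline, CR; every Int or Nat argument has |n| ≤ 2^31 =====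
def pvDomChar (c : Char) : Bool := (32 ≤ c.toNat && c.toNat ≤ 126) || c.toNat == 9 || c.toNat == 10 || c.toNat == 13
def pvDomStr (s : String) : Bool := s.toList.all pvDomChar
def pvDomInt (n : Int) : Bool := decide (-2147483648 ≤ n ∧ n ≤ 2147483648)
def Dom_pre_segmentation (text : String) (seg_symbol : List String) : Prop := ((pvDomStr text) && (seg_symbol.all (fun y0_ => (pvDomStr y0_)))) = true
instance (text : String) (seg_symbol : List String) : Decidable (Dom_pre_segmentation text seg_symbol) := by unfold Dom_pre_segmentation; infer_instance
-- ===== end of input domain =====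

-- B replaces A's mutable-accumulator flush loop by a boundary-index comprehension plus pairwise slicing (alternative decomposition, same cost class).

-- Python `c in seg_symbol` for a single character c (both Pythons use the same test).
def pvMemSym (sym : List String) (c : Char) : Bool := sym.contains (String.singleton c)

-- ===== PORT A =====
-- loop body of A: flush the current segment at a boundary, then append the char.
-- new_text[-1] is ported as getLastD ' '; exact because new_text is never empty when it is read.
def pvStepA (sym : List String) (st : List String × List Char) (word : Char) : List String × List Char :=
  if (!pvMemSym sym word && pvMemSym sym (st.2.getLastD ' ')) = true then
    (st.1 ++ [String.mk st.2], [word])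
  else (st.1, st.2 ++ [word])

def pre_segmentation (text : String) (seg_symbol : List String) : List String :=
  match text.toList with
  | [] => []  -- Python raises IndexError here (text[0]); excluded by Pre_
  | c0 :: rest =>
    let st := rest.foldl (pvStepA seg_symbol) ([], [c0])
    if st.2.isEmpty then st.1 else st.1 ++ [String.mk st.2]

-- ===== PORT B =====
-- condition of B's comprehension: text[i] not in seg_symbol and text[i-1] in seg_symbol
-- (getD i ' ' is exact: every index tested/sliced is in range).
def pvCondB (sym : List String) (cs : List Char) (i : Nat) : Bool :=
  !pvMemSym sym (cs.getD i ' ') && pvMemSym sym (cs.getD (i - 1) ' ')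

def pre_segmentation_alt (text : String) (seg_symbol : List String) : List String :=
  let cs := text.toList
  let n := cs.length
  -- range(1, n) = List.range' 1 (n-1)
  let bounds : List Nat := [0] ++ (List.range' 1 (n - 1)).filter (pvCondB seg_symbol cs) ++ [n]
  -- text[a:b] with 0 ≤ a ≤ b ≤ n is (cs.drop a).take (b - a)
  (bounds.zip bounds.tail).map (fun p => String.mk ((cs.drop p.1).take (p.2 - p.1)))

-- ===== PRECONDITION & SPEC =====
-- Pre_ excludes exactly the empty text, on which A raises IndexError (text[0]).
def Pre_pre_segmentation (text : String) (seg_symbol : List String) : Prop := text ≠ ""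
instance (text : String) (seg_symbol : List String) : Decidable (Pre_pre_segmentation text seg_symbol) := by unfold Pre_pre_segmentation; infer_instance

def pvWitness_pre_segmentation : String × List String := ("a\nb", ["\n"])

def Spec_pre_segmentation (text : String) (seg_symbol : List String) (out : List String) : Prop := out = pre_segmentation_alt text seg_symbol
instance (text : String) (seg_symbol : List String) (out : List String) : Decidable (Spec_pre_segmentation text seg_symbol out) := by unfold Spec_pre_segmentation; infer_instance

-- ===== CLAIM (what is proved, stated in full; the proofs are below) =====
def Claim_equal_pre_segmentation : Prop := ∀ (text : String) (seg_symbol : List String), Dom_pre_segmentation text seg_symbol → Pre_pre_segmentation text seg_symbol → Spec_pre_segmentation text seg_symbol (pre_segmentation text seg_symbol)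

-- ===== LEMMAS AND PROOFS =====

-- the common recursive segmentation spec (over char lists; cur is the segment being built)
def pvF (sym : List String) : List Char → List Char → List (List Char)
  | cur, [] => [cur]
  | cur, c :: rest =>
    if (!pvMemSym sym c && pvMemSym sym (cur.getLastD ' ')) = true then
      cur :: pvF sym [c] rest
    else pvF sym (cur ++ [c]) rest

-- B's slicing over a list of bounds, recursively
def pvG (cs : List Char) : Nat → List Nat → List (List Char)
  | _, [] => []
  | a, j :: js => ((cs.drop a).take (j - a)) :: pvG cs j js

lemma pvA_fold (sym : List String) (l : List Char) :
    ∀ (seg : List String) (cur : List Char), cur ≠ [] →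
      (let st := l.foldl (pvStepA sym) (seg, cur);
       if st.2.isEmpty then st.1 else st.1 ++ [String.mk st.2])
      = seg ++ (pvF sym cur l).map String.mk := by
  induction l with
  | nil =>
    intro seg cur h
    simp [pvF, List.isEmpty_iff, h]
  | cons c rest ih =>
    intro seg cur h
    simp only [List.foldl_cons, pvStepA, pvF]
    by_cases hc : (!pvMemSym sym c && pvMemSym sym (cur.getLastD ' ')) = true
    · simp only [hc, if_true]
      rw [ih (seg ++ [String.mk cur]) [c] (by simp)]
      simp
    · simp only [if_neg hc]
      rw [ih seg (cur ++ [c]) (by simp)]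

lemma pvB_zip (cs : List Char) :
    ∀ (bt : List Nat) (b0 : Nat),
      (((b0 :: bt).zip bt).map (fun p => String.mk ((cs.drop p.1).take (p.2 - p.1))))
      = (pvG cs b0 bt).map String.mk := by
  intro bt
  induction bt with
  | nil => intro b0; simp [pvG]
  | cons j js ih =>
    intro b0
    simp only [List.zip_cons_cons, List.map_cons, pvG]
    rw [ih j]

lemma pvCur_getLastD (cs : List Char) (a k : Nat) (hak : a < k) (hk : k ≤ cs.length) :
    ((cs.drop a).take (k - a)).getLastD ' ' = cs.getD (k - 1) ' ' := by
  have hlen : ((cs.drop a).take (k - a)).length = k - a := by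
    simp [List.length_take, List.length_drop]; omega
  have hne : ((cs.drop a).take (k - a)) ≠ [] := by
    intro h; rw [h] at hlen; simp at hlen; omega
  rw [List.getLastD_eq_getLast?, List.getLast?_eq_getElem?]
  have hidx : ((cs.drop a).take (k - a)).length - 1 = k - a - 1 := by omega
  rw [hlen]
  have h1 : k - a - 1 < ((cs.drop a).take (k - a)).length := by omega
  rw [List.getElem?_eq_getElem h1]
  have : ((cs.drop a).take (k - a))[k - a - 1]'h1 = cs[k - 1]'(by omega) := by
    rw [List.getElem_take, List.getElem_drop]
    congr 1; omega
  rw [this, List.getD_eq_getElem?_getD, List.getElem?_eq_getElem (by omega : k - 1 < cs.length)]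

-- the key correspondence: B's bound collection + slicing equals the recursive spec
lemma pvKey (sym : List String) (cs : List Char) :
    ∀ (m a k : Nat), k + m = cs.length → a < k →
      pvG cs a ((List.range' k m).filter (pvCondB sym cs) ++ [cs.length])
      = pvF sym ((cs.drop a).take (k - a)) (cs.drop k) := by
  intro m
  induction m with
  | zero =>
    intro a k hkm hak
    have hk : k = cs.length := by omega
    subst hk
    simp [pvG, pvF, List.drop_length]
  | succ m ih =>
    intro a k hkm hak
    have hkn : k < cs.length := by omega
    have hdrop : cs.drop k = cs[k] :: cs.drop (k + 1) := List.drop_eq_getElem_cons hkn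
    have hget : cs.getD k ' ' = cs[k] := by
      rw [List.getD_eq_getElem?_getD, List.getElem?_eq_getElem hkn]; rfl
    have hlast : ((cs.drop a).take (k - a)).getLastD ' ' = cs.getD (k - 1) ' ' :=
      pvCur_getLastD cs a k hak (by omega)
    rw [List.range'_succ, List.filter_cons, hdrop]
    by_cases hc : pvCondB sym cs k = true
    · unfold pvCondB at hc
      have hcond : (!pvMemSym sym cs[k] && pvMemSym sym (((cs.drop a).take (k - a)).getLastD ' ')) = true := by
        rw [hlast, ← hget]; exact hc
      rw [if_pos (by rw [pvCondB]; exact hc)]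
      simp only [List.cons_append, pvG, pvF, hcond, if_true]
      rw [ih k (k + 1) (by omega) (by omega)]
      have h1 : k + 1 - k = 1 := by omega
      rw [h1, hdrop, List.take_succ_cons, List.take_zero]
    · have hc' : pvCondB sym cs k = false := by
        revert hc; cases pvCondB sym cs k <;> simp
      unfold pvCondB at hc'
      have hcond : (!pvMemSym sym cs[k] && pvMemSym sym (((cs.drop a).take (k - a)).getLastD ' ')) = false := by
        rw [hlast, ← hget]; exact hc'
      rw [if_neg (by rw [pvCondB, hc']; simp)]
      simp only [pvF, hcond, Bool.false_eq_true, if_false]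
      rw [ih a (k + 1) (by omega) (by omega)]
      have h1 : (cs.drop a).take (k - a) ++ [cs[k]] = (cs.drop a).take (k + 1 - a) := by
        have hl : k - a < (cs.drop a).length := by simp [List.length_drop]; omega
        have h2 : (cs.drop a)[k - a]? = some cs[k] := by
          rw [List.getElem?_eq_getElem hl, List.getElem_drop]
          congr 2; omega
        have h3 : k + 1 - a = (k - a) + 1 := by omega
        rw [h3, List.take_succ, h2]
        simp
      rw [h1]

-- ===== VERDICT (by name: the statement is the Claim_ definition above) =====
theorem pre_segmentation_spec : Claim_equal_pre_segmentation := by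
  intro text seg_symbol _ hpre
  unfold Spec_pre_segmentation
  have hne : text.toList ≠ [] := by
    intro h
    exact hpre (by rwa [← String.toList_eq_nil_iff])
  obtain ⟨c0, rest, htl⟩ : ∃ c0 rest, text.toList = c0 :: rest := by
    cases h : text.toList with
    | nil => exact absurd h hne
    | cons a l => exact ⟨a, l, rfl⟩
  unfold pre_segmentation pre_segmentation_alt
  rw [htl]
  simp only [List.cons_append, List.nil_append, List.tail_cons]
  rw [pvA_fold seg_symbol rest [] [c0] (by simp)]
  rw [pvB_zip (c0 :: rest)
        ((List.range' 1 ((c0 :: rest).length - 1)).filter (pvCondB seg_symbol (c0 :: rest)) ++ [(c0 :: rest).length]) 0]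
  rw [pvKey seg_symbol (c0 :: rest) ((c0 :: rest).length - 1) 0 1 (by simp; omega) (by omega)]
  simp
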